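-- pv_equiv track=rewrite | github.com/no-design-foundry/filters-rasterizer | rasterizer/rasterizer.py | bits
-- ===== SOURCE A (Python) =====
-- def bits(x):
--     data = []
--     for i in range(8):
--         value = x & 1
--         x = x >> 1
--         data.insert(0, value)
--         data.insert(0, value)
--     return data
-- ===== SOURCE B (Python) =====
-- def bits(x):
--     s = format(x & 0xFF, '08b')
--     out = []
--     for c in s:
--         b = int(c)
--         out.append(b)
--         out.append(b)
--     return out
-- ===== Notes on version B (the rewrite author's own statement) =====
-- stated objective: idiomatic
-- what changed: B renders the masked low byte as a fixed-width binary string at once and expands each character left-to-right with appends, instead of A's per-bit mask/shift loop that prepends each bit twice at the front of the list.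
import Mathlib
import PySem

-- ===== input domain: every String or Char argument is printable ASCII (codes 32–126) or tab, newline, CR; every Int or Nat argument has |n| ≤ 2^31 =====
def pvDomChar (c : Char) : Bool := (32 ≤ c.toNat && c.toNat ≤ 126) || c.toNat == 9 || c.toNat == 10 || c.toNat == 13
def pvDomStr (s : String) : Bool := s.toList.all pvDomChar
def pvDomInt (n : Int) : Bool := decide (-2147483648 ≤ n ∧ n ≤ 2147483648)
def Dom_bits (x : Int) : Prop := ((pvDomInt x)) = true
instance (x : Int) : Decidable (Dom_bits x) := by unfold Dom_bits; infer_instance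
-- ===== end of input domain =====

-- B renders the low byte as an 8-char binary string and expands it left-to-right,
-- instead of A's mask/shift loop prepending each bit twice (objective: idiomatic).

-- ===== PORT A =====
def bits (x : Int) : List Int :=
  (PySem.List.pyRange 0 8 1).foldl
    (fun (st : Int × List Int) _ =>
      let value := PySem.Int.band st.1 1
      let x' := st.1 >>> (1 : Nat)
      (x', PySem.List.insert (PySem.List.insert st.2 0 value) 0 value))
    (x, []) |>.2

-- ===== PORT B =====
-- hand port of format(n, '08b') for 0 ≤ n < 2^8: exactly 8 binary digits, MSB first
def pvBin8 : Nat → Nat → List Char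
  | 0, _ => []
  | k+1, n => pvBin8 k (n / 2) ++ [if n % 2 = 1 then '1' else '0']

def bits_alt (x : Int) : List Int :=
  let s := pvBin8 8 (PySem.Int.band x 255).toNat
  -- int(c) is ported as the obvious digit test: exact on the '0'/'1' chars pvBin8 produces
  s.foldl (fun out c => let b : Int := if c = '1' then 1 else 0; out ++ [b, b]) []

-- ===== PRECONDITION & SPEC =====
def Spec_bits (x : Int) (out : List Int) : Prop := out = bits_alt x
instance (x : Int) (out : List Int) : Decidable (Spec_bits x out) := by unfold Spec_bits; infer_instance

-- ===== CLAIM (what is proved, stated in full; the proofs are below) =====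
def Claim_equal_bits : Prop := ∀ (x : Int), Dom_bits x → Spec_bits x (bits x)

-- ===== LEMMAS AND PROOFS =====
theorem band255 (x : Int) : PySem.Int.band x 255 = x % 256 := by
  have hand : ∀ n : Nat, n &&& 255 = n % 256 := fun n => by
    have := Nat.and_two_pow_sub_one_eq_mod n 8; norm_num at this; omega
  unfold PySem.Int.band
  have h255 : ((255:Int).toNat) = 255 := rfl
  split_ifs with h h2 h2
  · rw [h255, hand]; omega
  · omega
  · rw [h255, Nat.land_comm, hand]; omega
  · omega

theorem mod2 (x : Int) : PySem.Int.mod x 2 = x % 2 := by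
  unfold PySem.Int.mod; rw [Int.fmod_eq_emod]; norm_num

theorem bitchar (n : Nat) :
    (if (if n % 2 = 1 then '1' else '0') = '1' then (1:Int) else 0) = ↑(n % 2) := by
  rcases Nat.mod_two_eq_zero_or_one n with h | h <;> simp [h]

set_option maxHeartbeats 1000000 in
theorem bits_eq_alt (x : Int) : bits x = bits_alt x := by
  have hb := band255 x
  have hr : PySem.List.pyRange 0 8 1 = [0,1,2,3,4,5,6,7] := by decide
  simp only [bits, bits_alt, hr, PySem.List.insert_zero, pvBin8,
    List.nil_append, List.cons_append,
    List.foldl_cons, List.foldl_nil, PySem.Int.band_one,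
    Int.shiftRight_eq_div_pow, mod2, hb, bitchar,
    List.cons.injEq, pow_one]
  norm_num
  repeat' apply And.intro
  all_goals omega

-- ===== VERDICT (by name: the statement is the Claim_ definition above) =====
theorem bits_spec : Claim_equal_bits := by
  intro x _
  unfold Spec_bits
  exact bits_eq_alt x
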